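-- pv_equiv track=rewrite | github.com/ArPiRobot/ArPiRobot-DeployTool | src/deploy_tool.py | convert_formats
-- ===== SOURCE A (Python) =====
-- def convert_formats(formats) -> str:
--     fmt_str = ""
--     for f in formats:
--         if f[0] == "gztar":
--             fmt_str = "{0} *.{1}".format(fmt_str, "tar.gz")
--             fmt_str = "{0} *.{1}".format(fmt_str, "tgz")
--         if f[0] == "bztar":
--             fmt_str = "{0} *.{1}".format(fmt_str, "tar.bz")
--             fmt_str = "{0} *.{1}".format(fmt_str, "tbz")
--         if f[0] == "xztar":
--             fmt_str = "{0} *.{1}".format(fmt_str, "tar.xz")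
--             fmt_str = "{0} *.{1}".format(fmt_str, "txz")
--         fmt_str = "{0} *.{1}".format(fmt_str, f[0])
--     return fmt_str
-- ===== SOURCE B (Python) =====
-- # Each tar flavour's whole output text is precomputed; the result is built by
-- # recursion on the list (right fold), not by an accumulator loop.
-- CHUNKS = {
--     "gztar": " *.tar.gz *.tgz *.gztar",
--     "bztar": " *.tar.bz *.tbz *.bztar",
--     "xztar": " *.tar.xz *.txz *.xztar",
-- }
--
--
-- def convert_formats(formats) -> str:
--     if not formats:
--         return ""
--     name = formats[0][0]
--     return CHUNKS.get(name, " *." + name) + convert_formats(formats[1:])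
-- ===== Notes on version B (the rewrite author's own statement) =====
-- stated objective: alternative
-- what changed: Replaced A's accumulator loop with run-time branch chain and token-by-token formatting by a table of fully precomputed per-format output chunks and a right recursion that concatenates the first element's chunk with the recursive result of the tail.
import Mathlib
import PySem

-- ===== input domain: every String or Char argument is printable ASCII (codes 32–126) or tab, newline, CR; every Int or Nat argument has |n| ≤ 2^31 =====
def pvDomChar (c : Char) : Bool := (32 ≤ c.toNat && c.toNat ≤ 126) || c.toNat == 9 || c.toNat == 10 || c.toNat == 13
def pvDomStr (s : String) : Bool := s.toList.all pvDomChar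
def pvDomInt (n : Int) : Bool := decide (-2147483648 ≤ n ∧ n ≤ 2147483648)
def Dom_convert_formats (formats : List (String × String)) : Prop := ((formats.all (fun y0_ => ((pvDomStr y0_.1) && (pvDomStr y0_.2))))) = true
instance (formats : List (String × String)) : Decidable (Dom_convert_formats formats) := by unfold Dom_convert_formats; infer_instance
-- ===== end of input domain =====

-- B replaces A's accumulator loop with a branch chain by a table of fully precomputed
-- per-format output chunks and a right recursion over the list (alternative; same cost).

-- ===== PORT A =====
-- one loop step of A: the three if-branches in order, then the unconditional append
def convert_formats_step (fmt_str : String) (f : String × String) : String :=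
  let s1 := if f.1 = "gztar" then (fmt_str ++ " *." ++ "tar.gz") ++ " *." ++ "tgz" else fmt_str
  let s2 := if f.1 = "bztar" then (s1 ++ " *." ++ "tar.bz") ++ " *." ++ "tbz" else s1
  let s3 := if f.1 = "xztar" then (s2 ++ " *." ++ "tar.xz") ++ " *." ++ "txz" else s2
  s3 ++ " *." ++ f.1

def convert_formats (formats : List (String × String)) : String :=
  formats.foldl convert_formats_step ""

-- ===== PORT B =====
def pvChunks : PySem.Dict String String :=
  PySem.Dict.ofList
    [("gztar", " *.tar.gz *.tgz *.gztar"),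
     ("bztar", " *.tar.bz *.tbz *.bztar"),
     ("xztar", " *.tar.xz *.txz *.xztar")]

def convert_formats_alt : List (String × String) → String
  | [] => ""
  | f :: fs => PySem.Dict.getD pvChunks f.1 (" *." ++ f.1) ++ convert_formats_alt fs

-- ===== PRECONDITION & SPEC =====
def Spec_convert_formats (formats : List (String × String)) (out : String) : Prop := out = convert_formats_alt formats
instance (formats : List (String × String)) (out : String) : Decidable (Spec_convert_formats formats out) := by unfold Spec_convert_formats; infer_instance

-- ===== CLAIM (what is proved, stated in full; the proofs are below) =====
def Claim_equal_convert_formats : Prop := ∀ (formats : List (String × String)), Dom_convert_formats formats → Spec_convert_formats formats (convert_formats formats)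

-- ===== LEMMAS AND PROOFS =====

-- A's loop step appends exactly B's chunk for that element
theorem pv_step_eq (s : String) (f : String × String) :
    convert_formats_step s f = s ++ PySem.Dict.getD pvChunks f.1 (" *." ++ f.1) := by
  have hit : pvChunks.items =
      [("gztar", " *.tar.gz *.tgz *.gztar"),
       ("bztar", " *.tar.bz *.tbz *.bztar"),
       ("xztar", " *.tar.xz *.txz *.xztar")] := by decide
  apply String.toList_injective
  by_cases h1 : f.1 = "gztar"
  · simp [convert_formats_step, h1, PySem.Dict.getD, PySem.Dict.get?, hit,
      String.toList_append]
  by_cases h2 : f.1 = "bztar"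
  · simp [convert_formats_step, h2, PySem.Dict.getD, PySem.Dict.get?, hit,
      String.toList_append, List.find?]
  by_cases h3 : f.1 = "xztar"
  · simp [convert_formats_step, h3, PySem.Dict.getD, PySem.Dict.get?, hit,
      String.toList_append, List.find?]
  · have h1' : ("gztar" == f.1) = false := by simp [Ne.symm h1]
    have h2' : ("bztar" == f.1) = false := by simp [Ne.symm h2]
    have h3' : ("xztar" == f.1) = false := by simp [Ne.symm h3]
    simp [convert_formats_step, h1, h2, h3, h1', h2', h3', PySem.Dict.getD,
      PySem.Dict.get?, hit, String.toList_append, List.find?]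

theorem pv_foldl_eq (fs : List (String × String)) (s : String) :
    fs.foldl convert_formats_step s = s ++ convert_formats_alt fs := by
  induction fs generalizing s with
  | nil => simp [convert_formats_alt]
  | cons f t ih =>
    simp only [List.foldl_cons, ih, pv_step_eq, convert_formats_alt, String.append_assoc]

-- ===== VERDICT (by name: the statement is the Claim_ definition above) =====
theorem convert_formats_spec : Claim_equal_convert_formats := by
  intro formats _
  unfold Spec_convert_formats convert_formats
  rw [pv_foldl_eq]
  simp
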